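-- pv_equiv track=rewrite | github.com/fersilverio/A-Star-MOA | a_star.py | h2
-- ===== SOURCE A (Python) =====
-- def h2(tabuleiro):
--     seq_fora_lugar = 0
--     aux = list()
--     for i in range(len(tabuleiro)):
--         for j in range(len(tabuleiro)):
--             aux.append(tabuleiro[i][j])
--     for i in range(0,(len(aux) - 1)):
--         if aux[i + 1] != aux[i] + 1:
--             if aux[i] == 0:
--                 continue
--             else:
--                 seq_fora_lugar += 1
--     return seq_fora_lugar
-- ===== SOURCE B (Python) =====
-- def h2(tabuleiro):
--     seq_fora_lugar = 0
--     prev = None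
--     for i in range(len(tabuleiro)):
--         for j in range(len(tabuleiro)):
--             val = tabuleiro[i][j]
--             if prev is not None and prev != 0 and val != prev + 1:
--                 seq_fora_lugar += 1
--             prev = val
--     return seq_fora_lugar
-- ===== Notes on version B (the rewrite author's own statement) =====
-- stated objective: simpler
-- what changed: B fuses flattening and scanning into a single pass that keeps only the previous value, instead of materialising an aux list and re-scanning it by index.
import Mathlib
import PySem

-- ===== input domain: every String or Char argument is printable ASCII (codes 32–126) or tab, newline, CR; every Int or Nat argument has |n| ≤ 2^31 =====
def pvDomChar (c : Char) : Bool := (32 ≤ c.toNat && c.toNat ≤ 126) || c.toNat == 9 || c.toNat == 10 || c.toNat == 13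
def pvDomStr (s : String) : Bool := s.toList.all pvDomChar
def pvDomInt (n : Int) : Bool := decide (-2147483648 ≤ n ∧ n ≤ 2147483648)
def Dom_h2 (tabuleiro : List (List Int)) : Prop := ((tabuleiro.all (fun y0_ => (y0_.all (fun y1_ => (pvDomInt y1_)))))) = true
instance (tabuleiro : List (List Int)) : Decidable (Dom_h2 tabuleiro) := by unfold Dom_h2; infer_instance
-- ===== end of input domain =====

-- B fuses flattening and scanning into a single pass keeping only the previous value (simpler; same cost).

-- ===== PORT A =====
def h2 (tabuleiro : List (List Int)) : Int :=
  let aux : List Int :=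
    (PySem.List.pyRange 0 (tabuleiro.length : Int) 1).foldl
      (fun aux i =>
        (PySem.List.pyRange 0 (tabuleiro.length : Int) 1).foldl
          (fun aux j => aux ++ [PySem.List.pyGetD (PySem.List.pyGetD tabuleiro i []) j 0]) aux)
      []
  (PySem.List.pyRange 0 ((aux.length : Int) - 1) 1).foldl
    (fun c i =>
      if PySem.List.pyGetD aux (i + 1) 0 ≠ PySem.List.pyGetD aux i 0 + 1 then
        if PySem.List.pyGetD aux i 0 = 0 then c else c + 1
      else c)
    0

-- ===== PORT B =====
def h2_alt (tabuleiro : List (List Int)) : Int :=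
  ((PySem.List.pyRange 0 (tabuleiro.length : Int) 1).foldl
      (fun s i =>
        (PySem.List.pyRange 0 (tabuleiro.length : Int) 1).foldl
          (fun (s : Int × Option Int) j =>
            ((match s.2 with
              | none => s.1
              | some p => if p ≠ 0 ∧ PySem.List.pyGetD (PySem.List.pyGetD tabuleiro i []) j 0 ≠ p + 1 then s.1 + 1 else s.1),
              some (PySem.List.pyGetD (PySem.List.pyGetD tabuleiro i []) j 0)))
          s)
      ((0 : Int), (none : Option Int))).1

-- ===== PRECONDITION & SPEC =====
-- Pre_ excludes exactly the ragged grids on which A raises IndexError (some row shorter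
-- than the number of rows); B raises there too.
def Pre_h2 (tabuleiro : List (List Int)) : Prop :=
  ∀ row ∈ tabuleiro, tabuleiro.length ≤ row.length
instance (tabuleiro : List (List Int)) : Decidable (Pre_h2 tabuleiro) := by unfold Pre_h2; infer_instance

def pvWitness_h2 : List (List Int) := [[1, 2, 3], [0, 5, 4], [7, 8, 6]]

def Spec_h2 (tabuleiro : List (List Int)) (out : Int) : Prop := out = h2_alt tabuleiro
instance (tabuleiro : List (List Int)) (out : Int) : Decidable (Spec_h2 tabuleiro out) := by unfold Spec_h2; infer_instance

-- ===== CLAIM (what is proved, stated in full; the proofs are below) =====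
def Claim_equal_h2 : Prop := ∀ (tabuleiro : List (List Int)), Dom_h2 tabuleiro → Pre_h2 tabuleiro → Spec_h2 tabuleiro (h2 tabuleiro)

-- ===== LEMMAS AND PROOFS =====

-- adjacent "out of sequence" count of (p :: xs), shared characterisation of both loops
def specCount : Int → List Int → Int
  | _, [] => 0
  | p, v :: t => (if p ≠ 0 ∧ v ≠ p + 1 then 1 else 0) + specCount v t

-- generic: an index loop over range(n) reading xs.getD is a structural fold over xs.take n
theorem foldl_range_getD {σ : Type} (step : σ → Int → σ) :
    ∀ (n : Nat) (xs : List Int), n ≤ xs.length → ∀ (s : σ),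
      (List.range n).foldl (fun s k => step s (xs.getD k 0)) s = (xs.take n).foldl step s := by
  intro n
  induction n with
  | zero => simp
  | succ m ih =>
    intro xs h s
    have hm : m < xs.length := by omega
    rw [List.range_succ, List.foldl_append, ih xs (by omega) s, List.take_add_one,
        List.getElem?_eq_getElem hm, List.foldl_append]
    simp only [Option.toList_some, List.foldl_cons, List.foldl_nil, List.getD,
      List.getElem?_eq_getElem hm, Option.getD_some]

theorem loopA (xs : List Int) : ∀ (x : Int) (c : Int),
    (List.range xs.length).foldl
      (fun c k =>
        if (x :: xs).getD (k + 1) 0 ≠ (x :: xs).getD k 0 + 1 then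
          if (x :: xs).getD k 0 = 0 then c else c + 1
        else c) c
      = c + specCount x xs := by
  induction xs with
  | nil => simp [specCount]
  | cons y t ih =>
    intro x c
    rw [List.length_cons, List.range_succ_eq_map]
    simp only [List.foldl_cons, List.foldl_map]
    have h0 : ∀ (k : Nat), ((x :: y :: t).getD (k + 1) 0) = ((y :: t).getD k 0) := by
      intro k; simp [List.getD]
    simp only [h0]
    rw [ih y _]
    simp only [List.getD, List.getElem?_cons_zero, Option.getD_some, specCount]
    by_cases h1 : y = x + 1 <;> by_cases h2 : x = 0 <;> simp [h1, h2] <;> ring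

theorem loopB (xs : List Int) : ∀ (p c : Int),
    (xs.foldl
      (fun (s : Int × Option Int) val =>
        ((match s.2 with
          | none => s.1
          | some q => if q ≠ 0 ∧ val ≠ q + 1 then s.1 + 1 else s.1), some val))
      (c, some p)).1 = c + specCount p xs := by
  induction xs with
  | nil => simp [specCount]
  | cons v t ih =>
    intro p c
    simp only [List.foldl_cons, specCount]
    rw [ih v]
    by_cases h : p ≠ 0 ∧ v ≠ p + 1 <;> simp [h] <;> ring

-- the flattening both programs perform: the first (number of rows) entries of each row
def flat (tab : List (List Int)) : List Int := tab.flatMap (fun row => row.take tab.length)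

-- the inner j-loop of either port, as a fold over row.take n
theorem inner_loop {σ : Type} (step : σ → Int → σ) (row : List Int) (n : Nat)
    (h : n ≤ row.length) (s : σ) :
    (PySem.List.pyRange 0 (n : Int) 1).foldl (fun s j => step s (PySem.List.pyGetD row j 0)) s
      = (row.take n).foldl step s := by
  rw [PySem.List.pyRange_one, List.foldl_map]
  simp only [Int.toNat_natCast, zero_add, Int.sub_zero]
  have hg : ∀ (k : Nat), PySem.List.pyGetD row ((k : Int)) 0 = row.getD k 0 := by
    intro k; simp [PySem.List.pyGetD_natCast]
  simp only [hg]
  exact foldl_range_getD step n row h s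

theorem aux_eq_flat (tab : List (List Int)) (h : Pre_h2 tab) :
    (PySem.List.pyRange 0 (tab.length : Int) 1).foldl
      (fun aux i =>
        (PySem.List.pyRange 0 (tab.length : Int) 1).foldl
          (fun aux j => aux ++ [PySem.List.pyGetD (PySem.List.pyGetD tab i []) j 0]) aux)
      [] = flat tab := by
  rw [PySem.List.foldl_pyRange_zero_pyGetD' tab [] (fun aux row =>
        (PySem.List.pyRange 0 (tab.length : Int) 1).foldl
          (fun aux j => aux ++ [PySem.List.pyGetD row j 0]) aux) []]
  have hcong : tab.foldl (fun aux row =>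
      (PySem.List.pyRange 0 (tab.length : Int) 1).foldl
        (fun aux j => aux ++ [PySem.List.pyGetD row j 0]) aux) []
      = tab.foldl (fun aux row => aux ++ row.take tab.length) [] := by
    apply PySem.List.foldl_congr_mem
    intro aux row hmem
    rw [inner_loop (fun aux v => aux ++ [v]) row tab.length (h row hmem) aux]
    simpa using PySem.List.foldl_append_singleton_eq_map (fun v => v) (row.take tab.length) aux
  rw [hcong]
  simpa using PySem.List.foldl_append_eq_flatMap (fun row => row.take tab.length) tab []

theorem h2_eq_spec (tab : List (List Int)) (h : Pre_h2 tab) :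
    h2 tab = (match flat tab with | [] => 0 | x :: t => specCount x t) := by
  unfold h2
  rw [aux_eq_flat tab h]
  cases hf : flat tab with
  | nil => simp
  | cons x t =>
    simp only [List.length_cons]
    have hlen : ((((t.length + 1 : Nat) : Int)) - 1) = ((t.length : Nat) : Int) := by
      push_cast; ring
    rw [hlen, PySem.List.pyRange_one]
    simp only [Int.sub_zero, Int.toNat_natCast, List.foldl_map, zero_add]
    have hcong : (List.range t.length).foldl
        (fun c (k : Nat) =>
          if PySem.List.pyGetD (x :: t) ((k : Int) + 1) 0 ≠ PySem.List.pyGetD (x :: t) ((k : Int)) 0 + 1 then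
            if PySem.List.pyGetD (x :: t) ((k : Int)) 0 = 0 then c else c + 1
          else c) (0 : Int)
        = (List.range t.length).foldl
        (fun c k =>
          if (x :: t).getD (k + 1) 0 ≠ (x :: t).getD k 0 + 1 then
            if (x :: t).getD k 0 = 0 then c else c + 1
          else c) (0 : Int) := by
      apply PySem.List.foldl_congr_mem
      intro c k _
      have e1 : PySem.List.pyGetD (x :: t) ((k : Int)) 0 = (x :: t).getD k 0 := by
        rw [PySem.List.pyGetD_natCast]
      have e2 : PySem.List.pyGetD (x :: t) ((k : Int) + 1) 0 = (x :: t).getD (k + 1) 0 := by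
        rw [show ((k : Int) + 1) = ((k + 1 : Nat) : Int) from by push_cast; ring,
            PySem.List.pyGetD_natCast]
      rw [e1, e2]
    rw [hcong, loopA t x 0, zero_add]

theorem h2_alt_eq_spec (tab : List (List Int)) (h : Pre_h2 tab) :
    h2_alt tab = (match flat tab with | [] => 0 | x :: t => specCount x t) := by
  unfold h2_alt
  rw [PySem.List.foldl_pyRange_zero_pyGetD' tab [] (fun s row =>
        (PySem.List.pyRange 0 (tab.length : Int) 1).foldl
          (fun (s : Int × Option Int) j =>
            ((match s.2 with
              | none => s.1
              | some p => if p ≠ 0 ∧ PySem.List.pyGetD row j 0 ≠ p + 1 then s.1 + 1 else s.1),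
              some (PySem.List.pyGetD row j 0))) s) ((0 : Int), (none : Option Int))]
  have hcong : tab.foldl (fun s row =>
      (PySem.List.pyRange 0 (tab.length : Int) 1).foldl
        (fun (s : Int × Option Int) j =>
          ((match s.2 with
            | none => s.1
            | some p => if p ≠ 0 ∧ PySem.List.pyGetD row j 0 ≠ p + 1 then s.1 + 1 else s.1),
            some (PySem.List.pyGetD row j 0))) s) ((0 : Int), (none : Option Int))
      = tab.foldl (fun s row => (row.take tab.length).foldl
          (fun (s : Int × Option Int) val =>
            ((match s.2 with
              | none => s.1
              | some p => if p ≠ 0 ∧ val ≠ p + 1 then s.1 + 1 else s.1), some val)) s)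
          ((0 : Int), (none : Option Int)) := by
    apply PySem.List.foldl_congr_mem
    intro s row hmem
    exact inner_loop (fun (s : Int × Option Int) val =>
      ((match s.2 with
        | none => s.1
        | some p => if p ≠ 0 ∧ val ≠ p + 1 then s.1 + 1 else s.1), some val)) row tab.length
      (h row hmem) s
  rw [hcong, ← List.foldl_map, ← List.foldl_flatten,
      show (tab.map (fun row => row.take tab.length)).flatten = flat tab by
        rw [flat, List.flatMap_def]]
  cases hf : flat tab with
  | nil => simp
  | cons x t =>
    simp only [List.foldl_cons]
    rw [loopB t x 0, zero_add]

-- ===== VERDICT (by name: the statement is the Claim_ definition above) =====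
theorem h2_spec : Claim_equal_h2 := by
  intro tab _ hpre
  unfold Spec_h2
  rw [h2_eq_spec tab hpre, h2_alt_eq_spec tab hpre]
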